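-- pv_equiv track=rewrite | github.com/JLopez662/ScheduleChronogram | chronogram.py | allocateTasksToWeeks
-- ===== SOURCE A (Python) =====
-- def allocateTasksToWeeks(tasks):
--     colWeekHours = [40] #first column, representing a work week, or 40 hours
--     chronogram = []
--
--     for task in tasks:
--         weeks = len(colWeekHours)
--         taskRow = ['_'] * weeks #current row times the weeks needed
--         while task > 0: #While the task has hours left to assing
--             for i in range(len(colWeekHours)):
--                 if task <= colWeekHours[i]: #task needs less hours than available in current work week
--                     colWeekHours[i] -= task
--                     taskRow[i] = 'X'
--                     task = 0 #Task hours fully allocated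
--                     break
--                 else:        #Task needs more hours than available in current work week
--                     if colWeekHours[i] > 0:
--                         task -= colWeekHours[i]
--                         taskRow[i] = 'X'
--                         colWeekHours[i] = 0
--
--             #If task still has hours left not allocated, add new week
--             if task > 0:
--                 colWeekHours.append(40)
--                 taskRow.append('_')    #Extend task row for the new week
--
--         #Update chronogram with next task
--         chronogram.append(taskRow)
--
--          #Add weeks not used by tasks
--         for row in chronogram:
--             while len(row) < len(taskRow):
--                 row.append('_')
--
--     return chronogram
-- ===== SOURCE B (Python) =====
-- def allocateTasksToWeeks(tasks):
--     # Single pass keeping only (week count W, remaining hours r in the last week);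
--     # each task records an interval [s, e) of weeks it occupies; render/pad all rows once.
--     W, r = 1, 40
--     marks = []
--     for t in tasks:
--         if t <= 0:
--             marks.append((W, W))            # empty row
--         elif 0 < r and t <= r:
--             r -= t
--             marks.append((W - 1, W))        # fits in current last week
--         else:
--             s = W - 1 if 0 < r else W
--             rem = t - r
--             k = -(-rem // 40)               # new full/partial weeks needed
--             W += k
--             r = 40 * k - rem
--             marks.append((s, W))
--     return [['X' if s <= i < e else '_' for i in range(W)] for (s, e) in marks]
-- ===== Notes on version B (the rewrite author's own statement) =====
-- stated objective: faster
-- what changed: B keeps only the week count and the remaining hours of the last week, records for each task the interval of weeks it occupies in one pass, and renders/pads all rows once at the end, instead of A's per-task rescans of all weeks and repeated re-padding of every previous row.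
import Mathlib
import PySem

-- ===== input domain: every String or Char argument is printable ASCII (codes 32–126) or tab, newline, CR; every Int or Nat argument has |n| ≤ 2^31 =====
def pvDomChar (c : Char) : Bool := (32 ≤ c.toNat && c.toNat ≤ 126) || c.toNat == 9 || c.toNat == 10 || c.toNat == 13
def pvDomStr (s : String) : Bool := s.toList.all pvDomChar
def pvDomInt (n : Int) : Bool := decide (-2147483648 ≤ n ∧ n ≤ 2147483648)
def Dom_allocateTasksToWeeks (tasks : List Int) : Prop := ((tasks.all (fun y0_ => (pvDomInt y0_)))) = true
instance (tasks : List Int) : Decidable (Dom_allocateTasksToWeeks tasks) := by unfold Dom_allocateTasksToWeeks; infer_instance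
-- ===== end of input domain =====

-- B replaces A's repeated rescans of all weeks and repeated re-padding of all rows by a
-- single pass keeping only (week count, remaining hours of the last week), rendering all
-- rows once at the end (objective: faster).

-- ===== PORT A =====
-- A's inner `for i in range(len(colWeekHours))` walks colWeekHours and taskRow in step
-- (they always have equal length); the port fuses the two parallel lists into one zipped
-- list so the mutation at index i is the head of the recursion. Step for step otherwise.
def passZ : List (Int × String) → Int → List (Int × String) × Int
  | [], t => ([], t)
  | (c, x) :: cs, t =>
      if t ≤ c then ((c - t, "X") :: cs, 0)          -- task fits: allocate, break
      else if 0 < c then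
        let r := passZ cs (t - c)
        ((0, "X") :: r.1, r.2)                        -- drain this week, continue
      else
        let r := passZ cs t
        ((c, x) :: r.1, r.2)                          -- empty week: skip

-- termination lemmas cited by whileZ's decreasing_by (so they must precede it)
theorem passZ_le : ∀ (l : List (Int × String)) (t : Int), 0 ≤ t → (passZ l t).2 ≤ t
  | [], _, _ => le_refl _
  | (c, x) :: cs, t, h => by
      simp only [passZ]
      split
      · simpa
      · split
        · have := passZ_le cs (t - c) (by omega); omega
        · exact passZ_le cs t h

theorem passZ_lt : ∀ (l : List (Int × String)) (t : Int), 0 < t →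
    (∃ p ∈ l, 0 < p.1) → (passZ l t).2 < t
  | [], _, _, hex => by simp at hex
  | (c, x) :: cs, t, ht, hex => by
      simp only [passZ]
      split
      · simpa
      · split
        · have h0 := passZ_le cs (t - c) (by omega); omega
        · rename_i h1 h2
          refine passZ_lt cs t ht ?_
          rcases hex with ⟨p, hp, hpos⟩
          rcases List.mem_cons.1 hp with hp | hp
          · exfalso; rw [hp] at hpos; simp at hpos; omega
          · exact ⟨p, hp, hpos⟩

-- the `while task > 0` loop: one full pass, then (if hours remain) append a fresh week
def whileZ (l : List (Int × String)) (t : Int) : List (Int × String) :=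
  if ht : 0 < t then
    if hp : 0 < (passZ l t).2 then whileZ ((passZ l t).1 ++ [(40, "_")]) (passZ l t).2
    else (passZ l t).1
  else l
termination_by (t.toNat, if ∃ q ∈ l, 0 < q.1 then 0 else 1)
decreasing_by
  by_cases hex : ∃ q ∈ l, 0 < q.1
  · have := passZ_lt l t ht hex
    exact Prod.Lex.left _ _ (by omega)
  · have hle := passZ_le l t (by omega)
    rcases lt_or_eq_of_le hle with hlt | heq
    · exact Prod.Lex.left _ _ (by omega)
    · have hpos40 : ∃ q ∈ (passZ l t).1 ++ [((40 : Int), "_")], 0 < q.1 :=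
        ⟨(40, "_"), by simp⟩
      rw [heq, if_neg hex, if_pos hpos40]
      exact Prod.Lex.right _ (by norm_num)

def stepA (st : List Int × List (List String)) (task : Int) :
    List Int × List (List String) :=
  let z := whileZ (st.1.map (fun c => (c, "_"))) task   -- taskRow = ['_'] * weeks, fused
  let cw' := z.map Prod.fst
  let row' := z.map Prod.snd
  let chron' := st.2 ++ [row']
  -- for row in chronogram: while len(row) < len(taskRow): row.append('_')
  (cw', chron'.map (fun r => r ++ List.replicate (row'.length - r.length) "_"))

def allocateTasksToWeeks (tasks : List Int) : List (List String) :=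
  (tasks.foldl stepA ([40], [])).2

-- ===== PORT B =====
def renderB (W : Int) (se : Int × Int) : List String :=
  (List.range W.toNat).map (fun (i : Nat) => if se.1 ≤ (i : Int) ∧ (i : Int) < se.2 then "X" else "_")

def stepB (st : Int × Int × List (Int × Int)) (t : Int) : Int × Int × List (Int × Int) :=
  let W := st.1
  let r := st.2.1
  let marks := st.2.2
  if t ≤ 0 then (W, r, marks ++ [(W, W)])
  else if 0 < r ∧ t ≤ r then (W, r - t, marks ++ [(W - 1, W)])
  else
    let s := if 0 < r then W - 1 else W
    let rem := t - r
    let k := -((PySem.Int.floordiv (-rem) 40))        -- -(-rem // 40)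
    (W + k, 40 * k - rem, marks ++ [(s, W + k)])

def allocateTasksToWeeks_alt (tasks : List Int) : List (List String) :=
  let f := tasks.foldl stepB (1, 40, [])
  f.2.2.map (renderB f.1)

-- ===== PRECONDITION & SPEC =====
def Spec_allocateTasksToWeeks (tasks : List Int) (out : List (List String)) : Prop := out = allocateTasksToWeeks_alt tasks
instance (tasks : List Int) (out : List (List String)) : Decidable (Spec_allocateTasksToWeeks tasks out) := by unfold Spec_allocateTasksToWeeks; infer_instance

-- ===== CLAIM (what is proved, stated in full; the proofs are below) =====
def Claim_equal_allocateTasksToWeeks : Prop := ∀ (tasks : List Int), Dom_allocateTasksToWeeks tasks → Spec_allocateTasksToWeeks tasks (allocateTasksToWeeks tasks)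

-- ===== LEMMAS AND PROOFS =====

-- simulation invariant between A's state (colWeekHours, chronogram) and B's (W, r, marks)
def SimInv (a : List Int × List (List String)) (b : Int × Int × List (Int × Int)) : Prop :=
  1 ≤ b.1 ∧ 0 ≤ b.2.1 ∧ b.2.1 ≤ 40 ∧
  a.1 = List.replicate (b.1 - 1).toNat 0 ++ [b.2.1] ∧
  a.2 = b.2.2.map (renderB b.1) ∧
  ∀ se ∈ b.2.2, 0 ≤ se.1 ∧ se.2 ≤ b.1

theorem Inv_init : SimInv ([40], []) (1, 40, []) := by
  unfold SimInv
  refine ⟨by norm_num, by norm_num, by norm_num, by simp, rfl, by simp⟩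

theorem passZ_zeros (pre : List (Int × String)) (hpre : ∀ p ∈ pre, p.1 ≤ 0)
    (c : Int) (x : String) (t : Int) (ht : 0 < t) :
    passZ (pre ++ [(c, x)]) t =
      (pre ++ [if t ≤ c then (c - t, "X") else if 0 < c then (0, "X") else (c, x)],
       if t ≤ c then 0 else if 0 < c then t - c else t) := by
  induction pre with
  | nil => simp only [List.nil_append, passZ]; split_ifs <;> simp [passZ]
  | cons p ps ih =>
      have hp : p.1 ≤ 0 := hpre p (by simp)
      obtain ⟨pc, px⟩ := p
      simp only [List.cons_append, passZ]
      have h1 : ¬ t ≤ pc := by simp at hp; omega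
      have h2 : ¬ 0 < pc := by simp at hp; omega
      simp only [h1, if_false, h2]
      rw [ih (fun q hq => hpre q (by simp [hq]))]

theorem whileZ_eq (l : List (Int × String)) (t : Int) :
    whileZ l t = if 0 < t then
      (if 0 < (passZ l t).2 then whileZ ((passZ l t).1 ++ [(40, "_")]) (passZ l t).2
       else (passZ l t).1)
    else l := by
  rw [whileZ]
  simp only [dite_eq_ite]

-- the while loop on the canonical state: exhausted weeks ++ one fresh 40-hour week
theorem whileZ_shape_aux (n : Nat) : ∀ (pre : List (Int × String)) (t : Int),
    (∀ p ∈ pre, p.1 ≤ 0) → 0 < t → t ≤ 40 * (n : Int) →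
    whileZ (pre ++ [(40, "_")]) t =
      pre ++ List.replicate (-(PySem.Int.floordiv (-t) 40) - 1).toNat (0, "X")
          ++ [(40 * (-(PySem.Int.floordiv (-t) 40)) - t, "X")] := by
  induction n with
  | zero => intro pre t _ ht hle; exfalso; omega
  | succ m ih =>
      intro pre t hpre ht hle
      have hfd : PySem.Int.floordiv (-t) 40 = (-t) / 40 :=
        PySem.Int.floordiv_eq_ediv_of_pos (by omega)
      rw [whileZ_eq]
      simp only [ht, if_true]
      rw [passZ_zeros pre hpre 40 "_" t ht]
      by_cases h40 : t ≤ 40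
      · have hk : -(PySem.Int.floordiv (-t) 40) = 1 := by rw [hfd]; omega
        simp only [h40, if_true, hk]
        norm_num
      · have hrec : ¬ 0 < (40 : Int) → False := by omega
        simp only [h40, if_false, show (0:Int) < 40 by norm_num, if_true]
        have hpos : 0 < t - 40 := by omega
        simp only [hpos, if_true]
        rw [ih (pre ++ [((0 : Int), "X")])
              (t - 40)
              (by intro p hp
                  rcases List.mem_append.1 hp with h | h
                  · exact hpre p h
                  · simp at h; simp [h])
              hpos (by push_cast; omega)]
        have hfd' : PySem.Int.floordiv (-(t - 40)) 40 = (-(t - 40)) / 40 :=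
          PySem.Int.floordiv_eq_ediv_of_pos (by omega)
        have hk40 : -(PySem.Int.floordiv (-(t - 40)) 40) = -(PySem.Int.floordiv (-t) 40) - 1 := by
          rw [hfd, hfd']; omega
        have hk1 : 1 ≤ -(PySem.Int.floordiv (-t) 40) := by rw [hfd]; omega
        rw [hk40]
        have hrep : ((0 : Int), "X") :: List.replicate (-(PySem.Int.floordiv (-t) 40) - 1 - 1).toNat ((0 : Int), "X")
            = List.replicate (-(PySem.Int.floordiv (-t) 40) - 1).toNat ((0 : Int), "X") := by
          have h2 : 2 ≤ -(PySem.Int.floordiv (-t) 40) := by rw [hfd]; omega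
          have : (-(PySem.Int.floordiv (-t) 40) - 1).toNat
              = (-(PySem.Int.floordiv (-t) 40) - 1 - 1).toNat + 1 := by omega
          rw [this, List.replicate_succ]
        rw [← hrep]
        simp
        omega

theorem whileZ_shape (pre : List (Int × String)) (t : Int)
    (hpre : ∀ p ∈ pre, p.1 ≤ 0) (ht : 0 < t) :
    whileZ (pre ++ [(40, "_")]) t =
      pre ++ List.replicate (-(PySem.Int.floordiv (-t) 40) - 1).toNat (0, "X")
          ++ [(40 * (-(PySem.Int.floordiv (-t) 40)) - t, "X")] :=
  whileZ_shape_aux t.toNat pre t hpre ht (by omega)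

-- renderB as an explicit _ / X / _ block
theorem renderB_block (W s e : Int) (h0 : 0 ≤ s) (hse : s ≤ e) (heW : e ≤ W) :
    renderB W (s, e) =
      List.replicate s.toNat "_" ++ List.replicate (e - s).toNat "X"
        ++ List.replicate (W - e).toNat "_" := by
  unfold renderB
  apply List.ext_getElem
  · simp; omega
  · intro i h1 h2
    simp only [List.getElem_map, List.getElem_range, List.getElem_append,
      List.length_append, List.length_replicate, List.getElem_replicate]
    by_cases hc : s ≤ (i : Int) ∧ (i : Int) < e
    · rw [if_pos hc]
      split_ifs <;> first | rfl | (exfalso; omega)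
    · rw [if_neg hc]
      split_ifs <;> first | rfl | (exfalso; omega)

theorem renderB_empty (W : Int) : renderB W (W, W) = List.replicate W.toNat "_" := by
  unfold renderB
  apply List.ext_getElem
  · simp
  · intro i h1 h2
    simp only [List.getElem_map, List.getElem_range, List.getElem_replicate]
    rw [if_neg (by omega)]

theorem renderB_length (W : Int) (se : Int × Int) : (renderB W se).length = W.toNat := by
  simp [renderB]

-- padding a width-W row of an old mark to width W' re-renders it at width W'
theorem renderB_pad (W W' : Int) (se : Int × Int) (hW : W ≤ W') (he : se.2 ≤ W) :
    renderB W se ++ List.replicate (W'.toNat - W.toNat) "_" = renderB W' se := by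
  unfold renderB
  apply List.ext_getElem
  · simp; omega
  · intro i h1 h2
    simp only [List.getElem_append, List.length_map, List.length_range,
      List.getElem_map, List.getElem_range, List.getElem_replicate]
    split_ifs <;> first | rfl | (exfalso; omega)

theorem pad_append (chron : List (List String)) (marks : List (Int × Int)) (W W' : Int)
    (row : List String) (hWW : W ≤ W') (hrow : row.length = W'.toNat)
    (hchron : chron = marks.map (renderB W)) (hmk : ∀ se ∈ marks, 0 ≤ se.1 ∧ se.2 ≤ W) :
    List.map (fun rr => rr ++ List.replicate (row.length - rr.length) "_") (chron ++ [row])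
      = marks.map (renderB W') ++ [row] := by
  rw [hchron, List.map_append, List.map_map]
  congr 1
  · apply List.map_congr_left
    intro se hse
    simp only [Function.comp_apply]
    rw [renderB_length, hrow]
    exact renderB_pad W W' se hWW (hmk se hse).2
  · simp

theorem Inv_step (a : List Int × List (List String)) (b : Int × Int × List (Int × Int))
    (t : Int) (h : SimInv a b) : SimInv (stepA a t) (stepB b t) := by
  obtain ⟨cw, chron⟩ := a
  obtain ⟨W, r, marks⟩ := b
  obtain ⟨hW, hr0, hr40, hcw, hchron, hmk⟩ := h
  dsimp only at hW hr0 hr40 hcw hchron hmk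
  have hmap : cw.map (fun c => (c, "_")) =
      List.replicate (W - 1).toNat ((0 : Int), "_") ++ [(r, "_")] := by
    rw [hcw]; simp
  have hz : ∀ p ∈ List.replicate (W - 1).toNat ((0 : Int), "_"), p.1 ≤ 0 := by
    intro p hp; simp at hp; simp [hp.2]
  by_cases ht : t ≤ 0
  · -- while loop not entered
    have hwz : whileZ (cw.map (fun c => (c, "_"))) t = cw.map (fun c => (c, "_")) := by
      rw [whileZ_eq, if_neg (by omega)]
    simp only [stepA, stepB]
    rw [hwz, hmap, if_pos ht]
    unfold SimInv
    dsimp only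
    refine ⟨hW, hr0, hr40, ?_, ?_, ?_⟩
    · simp only [List.map_append, List.map_replicate, List.map_cons, List.map_nil]
    · refine (pad_append chron marks W W _ (le_refl W) ?_ hchron hmk).trans ?_
      · simp; omega
      · simp only [List.map_append, List.map_cons, List.map_nil]
        congr 2
        rw [renderB_empty]
        simp only [List.map_append, List.map_replicate, List.map_cons, List.map_nil]
        rw [show W.toNat = (W - 1).toNat + 1 by omega, List.replicate_succ']
    · intro se hse
      rcases List.mem_append.1 hse with hmem | hmem
      · exact hmk se hmem
      · simp at hmem; simp [hmem]; omega
  · have ht' : 0 < t := by omega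
    by_cases hfit : 0 < r ∧ t ≤ r
    · -- fits in the current last week
      have hpz : passZ (List.replicate (W - 1).toNat ((0:Int), "_") ++ [(r, "_")]) t
          = (List.replicate (W - 1).toNat ((0:Int), "_") ++ [(r - t, "X")], 0) := by
        rw [passZ_zeros _ hz r "_" t ht']
        simp only [if_pos hfit.2]
      have hwz : whileZ (cw.map (fun c => (c, "_"))) t =
          List.replicate (W - 1).toNat ((0:Int), "_") ++ [(r - t, "X")] := by
        rw [whileZ_eq, hmap, if_pos ht', hpz]
        norm_num
      simp only [stepA, stepB]
      rw [hwz, if_neg ht, if_pos hfit]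
      unfold SimInv
      dsimp only
      refine ⟨hW, by omega, by omega, ?_, ?_, ?_⟩
      · simp only [List.map_append, List.map_replicate, List.map_cons, List.map_nil]
      · refine (pad_append chron marks W W _ (le_refl W) ?_ hchron hmk).trans ?_
        · simp; omega
        · simp only [List.map_append, List.map_cons, List.map_nil]
          congr 2
          rw [renderB_block W (W - 1) W (by omega) (by omega) (by omega)]
          simp only [List.map_append, List.map_replicate, List.map_cons, List.map_nil]
          rw [show (W - (W - 1)).toNat = 1 by omega, show (W - W).toNat = 0 by omega]
          simp
      · intro se hse
        rcases List.mem_append.1 hse with hmem | hmem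
        · exact hmk se hmem
        · simp at hmem; simp [hmem]; omega
    · -- needs fresh weeks
      have hrem_pos : 0 < t - r := by
        rcases (not_and_or.1 hfit) with hc | hc
        · omega
        · omega
      by_cases hrpos : 0 < r
      · -- drain the partial last week, then k fresh weeks
        set k := -(PySem.Int.floordiv (-(t - r)) 40) with hkdef
        have hfd : PySem.Int.floordiv (-(t - r)) 40 = (-(t - r)) / 40 :=
          PySem.Int.floordiv_eq_ediv_of_pos (by omega)
        have hk1 : 1 ≤ k := by rw [hkdef, hfd]; omega
        have hkb : 40 * (k - 1) < t - r ∧ t - r ≤ 40 * k := by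
          rw [hkdef, hfd]; constructor <;> omega
        have hpz : passZ (List.replicate (W - 1).toNat ((0:Int), "_") ++ [(r, "_")]) t
            = (List.replicate (W - 1).toNat ((0:Int), "_") ++ [((0:Int), "X")], t - r) := by
          rw [passZ_zeros _ hz r "_" t ht']
          simp only [if_neg (show ¬ t ≤ r by omega), if_pos hrpos]
        have hz' : ∀ p ∈ List.replicate (W - 1).toNat ((0:Int), "_") ++ [((0:Int), "X")],
            p.1 ≤ 0 := by
          intro p hp
          rcases List.mem_append.1 hp with hmem | hmem
          · exact hz p hmem
          · simp at hmem; simp [hmem]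
        have hwz : whileZ (cw.map (fun c => (c, "_"))) t =
            (List.replicate (W - 1).toNat ((0:Int), "_") ++ [((0:Int), "X")])
              ++ List.replicate (k - 1).toNat ((0:Int), "X") ++ [(40 * k - (t - r), "X")] := by
          rw [whileZ_eq, hmap, if_pos ht', hpz]
          rw [if_pos (show (0:Int) <
            ((List.replicate (W - 1).toNat ((0:Int), "_") ++ [((0:Int), "X")], t - r)).2 from hrem_pos)]
          rw [whileZ_shape _ (t - r) hz' hrem_pos]
        simp only [stepA, stepB]
        rw [hwz, if_neg ht, if_neg hfit]
        simp only [if_pos hrpos]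
        unfold SimInv
        dsimp only
        refine ⟨by omega, by omega, by omega, ?_, ?_, ?_⟩
        · simp only [List.map_append, List.map_replicate, List.map_cons, List.map_nil]
          rw [show (W + k - 1).toNat = (W - 1).toNat + (1 + ((k - 1).toNat + 0)) by omega]
          simp [List.replicate_add, List.replicate_succ]
          omega
        · refine (pad_append chron marks W (W + k) _ (by omega) ?_ hchron hmk).trans ?_
          · simp; omega
          · simp only [List.map_append, List.map_cons, List.map_nil]
            congr 2
            rw [renderB_block (W + k) (W - 1) (W + k) (by omega) (by omega) (by omega)]
            simp only [List.map_append, List.map_replicate, List.map_cons, List.map_nil]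
            rw [show (W + k - (W + k)).toNat = 0 by omega,
                show (W + k - (W - 1)).toNat = 1 + ((k - 1).toNat + 1) by omega]
            rw [List.replicate_add, List.replicate_succ, List.replicate_succ,
                List.replicate_zero]
            simp
            rw [← List.replicate_succ', ← List.replicate_succ]
        · intro se hse
          rcases List.mem_append.1 hse with hmem | hmem
          · have := hmk se hmem; omega
          · simp at hmem; simp [hmem]; omega
      · -- last week already full (r = 0): k fresh weeks
        have hr : r = 0 := by omega
        set k := -(PySem.Int.floordiv (-(t - r)) 40) with hkdef
        have hfd : PySem.Int.floordiv (-(t - r)) 40 = (-(t - r)) / 40 :=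
          PySem.Int.floordiv_eq_ediv_of_pos (by omega)
        have hk1 : 1 ≤ k := by rw [hkdef, hfd]; omega
        have hkb : 40 * (k - 1) < t - r ∧ t - r ≤ 40 * k := by
          rw [hkdef, hfd]; constructor <;> omega
        have hpz : passZ (List.replicate (W - 1).toNat ((0:Int), "_") ++ [(r, "_")]) t
            = (List.replicate (W - 1).toNat ((0:Int), "_") ++ [(r, "_")], t) := by
          rw [passZ_zeros _ hz r "_" t ht']
          simp only [if_neg (show ¬ t ≤ r by omega), if_neg (show ¬ (0:Int) < r by omega)]
        have hz' : ∀ p ∈ List.replicate (W - 1).toNat ((0:Int), "_") ++ [(r, "_")],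
            p.1 ≤ 0 := by
          intro p hp
          rcases List.mem_append.1 hp with hmem | hmem
          · exact hz p hmem
          · simp at hmem; simp [hmem]; omega
        have hwz : whileZ (cw.map (fun c => (c, "_"))) t =
            (List.replicate (W - 1).toNat ((0:Int), "_") ++ [(r, "_")])
              ++ List.replicate (k - 1).toNat ((0:Int), "X") ++ [(40 * k - t, "X")] := by
          rw [whileZ_eq, hmap, if_pos ht', hpz]
          rw [if_pos (show (0:Int) <
            ((List.replicate (W - 1).toNat ((0:Int), "_") ++ [(r, "_")], t)).2 from ht')]
          rw [whileZ_shape _ t hz' ht']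
          rw [show -(PySem.Int.floordiv (-t) 40) = k by rw [hkdef, hr]; norm_num]
        simp only [stepA, stepB]
        rw [hwz, if_neg ht, if_neg hfit]
        simp only [if_neg hrpos]
        unfold SimInv
        dsimp only
        refine ⟨by omega, by omega, by omega, ?_, ?_, ?_⟩
        · simp only [List.map_append, List.map_replicate, List.map_cons, List.map_nil]
          rw [show (W + k - 1).toNat = ((W - 1).toNat + 1) + ((k - 1).toNat + 0) by omega]
          rw [show (40 * k - (t - r) : Int) = 40 * k - t by omega]
          simp [List.replicate_add, List.replicate_succ']
          omega
        · refine (pad_append chron marks W (W + k) _ (by omega) ?_ hchron hmk).trans ?_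
          · simp; omega
          · simp only [List.map_append, List.map_cons, List.map_nil]
            congr 2
            rw [renderB_block (W + k) W (W + k) (by omega) (by omega) (by omega)]
            simp only [List.map_append, List.map_replicate, List.map_cons, List.map_nil]
            rw [show (W + k - (W + k)).toNat = 0 by omega,
                show (W + k - W).toNat = (k - 1).toNat + 1 by omega,
                show W.toNat = (W - 1).toNat + 1 by omega]
            rw [List.replicate_succ', List.replicate_succ']
            simp
        · intro se hse
          rcases List.mem_append.1 hse with hmem | hmem
          · have := hmk se hmem; omega
          · simp at hmem; simp [hmem]; omega

theorem Inv_foldl : ∀ (tasks : List Int) (a : List Int × List (List String))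
    (b : Int × Int × List (Int × Int)), SimInv a b →
    SimInv (tasks.foldl stepA a) (tasks.foldl stepB b)
  | [], _, _, h => h
  | t :: ts, a, b, h => Inv_foldl ts _ _ (Inv_step a b t h)

-- ===== VERDICT (by name: the statement is the Claim_ definition above) =====
theorem allocateTasksToWeeks_spec : Claim_equal_allocateTasksToWeeks := by
  intro tasks _
  unfold Spec_allocateTasksToWeeks allocateTasksToWeeks allocateTasksToWeeks_alt
  have h := Inv_foldl tasks ([40], []) (1, 40, []) Inv_init
  exact h.2.2.2.2.1
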